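/-
  INTERFACE CHECK for the last clause of `arena_temp_restore.spec.pre` / `setup_temp_free.spec.pre` / `setup_temp_free.weakSpec.pre`
  ("`*f` does not meet what the release poisons": the farm's CONTRACT-PRE problem of freeze-5): every caller's carrier gives it.

      decode time (inverse_mdct.12, decode_residue.11)     `DecodeInv.obj : Ar.Blk (objBlock f)` — `*f` is a SETUP BLOCK; the arena at
                                                            the call is `Ar.pushTemp n` (the temp block of the function is still there)
      start_decoder (C5 C8 C11 – C15: the LIFO contract)    `StartDecoder.HandOK.objOut` — `*f` lies OUTSIDE the arena's buffer
      start_decoder.C7 (the machine-level contract)         `sz = 0`: nothing is poisoned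
-/
import Vorbis.Spec.DecodeInv
import Vorbis.Spec.StartDecoderAt
import Vorbis.Spec.Alloc
namespace Vorbis.Spec.ReleaseTest
open X86 X86.User Asan

/-- Decode time: the clause of `arena_temp_restore.spec.pre`, for the arena with the function's temp block (`Ar.pushTemp n`) and any
cut point `p`, from the decode-time invariant at the function's entry and the arena layer at the call. -/
example {others others' : List Obj} {frames : List (Nat × FrameLayout)} {len : Nat} {Ar : Arena} {stored room : Int}
    {ysz : Nat → Nat} {mem mem' : Mem} {f : Nat} (h : DecodeInv others frames len Ar stored room ysz mem f) (n p : Nat)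
    (hA : ArenaOK (Ar.pushTemp n) others' mem' f) :
    f + 1808 ≤ (Ar.pushTemp n).B + (Ar.pushTemp n).T ∨ (Ar.pushTemp n).B + p ≤ f := by
  have hb : Ar.Block f 1808 := h.obj
  have hb' : (Ar.pushTemp n).Block f 1808 := hb
  exact arena_temp_restore.apart_of_block hA hb' p

/-- start_decoder: the clause of `setup_temp_free.spec.pre` (LIFO: the top temp block `(T, m)` is released), from the hand-over
carrier's `objOut` and the arena layer at the call. -/
example {len f : Nat} {frames : List (Nat × FrameLayout)} {A : Arena × List Obj} {mem : Mem}
    (h : StartDecoder.HandOK len f frames A) (hA : ArenaOK A.1 A.2 mem f) {m : Nat} {rest : List (Nat × Nat)}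
    (ht : A.1.temps = (A.1.T, m) :: rest) :
    f + 1808 ≤ A.1.B + A.1.T ∨ A.1.B + A.1.T + r8 m + 32 ≤ f :=
  setup_temp_free.apart_of_out hA ht h.objOut

/-- start_decoder.C7 (`setup_temp_free(f, values, 0)` through the machine-level contract): the new clause holds because nothing is
poisoned. -/
example (u : State) (hz : (u.reg .rdx).toNat % 2 ^ 32 = 0) :
    u.reg .rsi = 0 ∨ r8 ((u.reg .rdx).toNat % 2 ^ 32) = 0 ∨
      (u.reg .rsi).toNat + r8 ((u.reg .rdx).toNat % 2 ^ 32) ≤ (u.reg .rdi).toNat + 132 ∨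
      (u.reg .rdi).toNat + 136 ≤ (u.reg .rsi).toNat := by
  right
  left
  rw [hz]
  decide

end Vorbis.Spec.ReleaseTest
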